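-- pv_equiv track=rewrite | github.com/arlovy/TP-AyED1 | TP8/ejercicio_10.py | eliminarclaves
-- ===== SOURCE A (Python) =====
-- def eliminarclaves(dict_: dict, claves: list[str]) -> tuple:
--     """
--     Elimina claves y sus valores de un diccionario cualquiera.
--     Recibe un diccionario y una lista de strings que indican las claves.
--     Retorna una tupla (diccionario nuevo, cantidad de elementos eliminados).
--     """
--     eliminados = 0
--     for key in claves:
--         if key in dict_:
--             try:
--                 dict_.pop(key)
--             except Exception:
--                 return dict_, 0
--             eliminados += 1
--     return dict_, eliminados
-- ===== SOURCE B (Python) =====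
-- def eliminarclaves(dict_: dict, claves: list[str]) -> tuple:
--     """
--     Elimina claves y sus valores de un diccionario cualquiera.
--     Recibe un diccionario y una lista de strings que indican las claves.
--     Retorna una tupla (diccionario nuevo, cantidad de elementos eliminados).
--     """
--     quitar = set(claves)
--     restantes = {k: v for k, v in dict_.items() if k not in quitar}
--     eliminados = len(dict_) - len(restantes)
--     dict_.clear()
--     dict_.update(restantes)
--     return dict_, eliminados
-- ===== Notes on version B (the rewrite author's own statement) =====
-- stated objective: alternative
-- what changed: A loops over the key list, membership-testing and popping each key while counting; B traverses the DICT instead, rebuilding it from the entries whose key is not in set(claves) and obtaining the count as the size difference, then restores the surviving entries in place.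
import Mathlib
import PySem

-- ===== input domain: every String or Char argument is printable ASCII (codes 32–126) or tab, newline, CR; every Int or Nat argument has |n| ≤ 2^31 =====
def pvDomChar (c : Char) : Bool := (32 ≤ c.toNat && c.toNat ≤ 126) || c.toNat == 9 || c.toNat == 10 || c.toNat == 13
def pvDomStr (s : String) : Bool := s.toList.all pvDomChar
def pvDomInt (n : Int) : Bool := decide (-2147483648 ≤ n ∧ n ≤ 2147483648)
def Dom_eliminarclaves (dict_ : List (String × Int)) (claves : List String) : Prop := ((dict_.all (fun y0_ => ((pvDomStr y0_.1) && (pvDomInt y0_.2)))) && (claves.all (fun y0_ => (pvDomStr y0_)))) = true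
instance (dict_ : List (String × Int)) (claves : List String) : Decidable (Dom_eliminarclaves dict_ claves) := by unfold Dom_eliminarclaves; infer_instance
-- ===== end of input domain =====

-- B traverses the dict instead of the key list: it rebuilds the dict from the entries whose key
-- is not in set(claves) and gets the count as the size difference (objective: alternative).
-- B restores the surviving entries into the same dict_ object (clear + update), so the in-place
-- mutation of A is preserved.


-- ===== PORT A =====
-- Port of A: 'for key in claves: if key in dict_: dict_.pop(key); eliminados += 1'.
-- 'key in dict_' is an any-scan over the assoc list; 'dict_.pop(key)' drops the key's entry
-- (filter on the assoc list, exact for a dict). The 'except' branch is unreachable in A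
-- (pop follows the membership test) and has no counterpart here.
def eliminarclaves (dict_ : List (String × Int)) (claves : List String) : (List (String × Int)) × Int :=
  claves.foldl
    (fun st key =>
      if st.1.any (fun p => p.1 == key) then
        (st.1.filter (fun p => p.1 != key), st.2 + 1)
      else st)
    (dict_, 0)

-- ===== PORT B =====
-- Port of B: quitar = set(claves); restantes = {k: v for (k,v) in dict_ if k not in quitar};
-- eliminados = len(dict_) - len(restantes); after clear()+update(restantes) the dict IS restantes.
def eliminarclaves_alt (dict_ : List (String × Int)) (claves : List String) : (List (String × Int)) × Int :=
  let quitar := PySem.Set.ofList claves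
  let restantes := dict_.filter (fun p => !PySem.Set.contains quitar p.1)
  (restantes, (dict_.length : Int) - (restantes.length : Int))

-- ===== PRECONDITION & SPEC =====
-- Pre_ only states that dict_ really encodes a Python dict: its keys are pairwise distinct.
-- Assoc lists with a repeated key correspond to no Python input, so nothing A returns on is excluded.
def Pre_eliminarclaves (dict_ : List (String × Int)) (claves : List String) : Prop :=
  (dict_.map Prod.fst).Nodup
instance (dict_ : List (String × Int)) (claves : List String) : Decidable (Pre_eliminarclaves dict_ claves) := by unfold Pre_eliminarclaves; infer_instance
def pvWitness_eliminarclaves : (List (String × Int)) × List String :=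
  ([("a", 1), ("b", 2), ("c", 3)], ["a", "c", "a", "z"])

def Spec_eliminarclaves (dict_ : List (String × Int)) (claves : List String) (out : (List (String × Int)) × Int) : Prop := out = eliminarclaves_alt dict_ claves
instance (dict_ : List (String × Int)) (claves : List String) (out : (List (String × Int)) × Int) : Decidable (Spec_eliminarclaves dict_ claves out) := by unfold Spec_eliminarclaves; infer_instance

-- ===== CLAIM (what is proved, stated in full; the proofs are below) =====
def Claim_equal_eliminarclaves : Prop := ∀ (dict_ : List (String × Int)) (claves : List String), Dom_eliminarclaves dict_ claves → Pre_eliminarclaves dict_ claves → Spec_eliminarclaves dict_ claves (eliminarclaves dict_ claves)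

-- ===== LEMMAS AND PROOFS =====

theorem foldl_add_append (xs : List String) : ∀ (a b : List String),
    List.foldl PySem.Set.add (a ++ b) xs
      = a ++ List.foldl PySem.Set.add b (xs.filter (fun y => decide (y ∉ a))) := by
  induction xs with
  | nil => intro a b; simp
  | cons x xs ih =>
    intro a b
    by_cases hx : x ∈ a
    · have h1 : PySem.Set.add (a ++ b) x = a ++ b := by
        simp [PySem.Set.add, hx]
      simp [List.foldl_cons, hx, ih]
    · have h1 : PySem.Set.add (a ++ b) x = a ++ PySem.Set.add b x := by
        simp [PySem.Set.add, hx]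
        split <;> simp
      simp [List.foldl_cons, h1, hx, ih]

theorem dedup_cons (x : String) (xs : List String) :
    PySem.List.dedup (x :: xs) = x :: PySem.List.dedup (xs.filter (fun y => y != x)) := by
  have h := foldl_add_append xs [x] []
  simp only [PySem.List.dedup, PySem.Set.ofList, List.foldl_cons]
  have hadd : PySem.Set.add PySem.Set.empty x = [x] := by rfl
  rw [hadd]
  have : ([x] : List String) = [x] ++ [] := by simp
  rw [this, h, List.singleton_append]
  have hf : (List.filter (fun y => decide (y ∉ [x])) xs) = List.filter (fun y => y != x) xs := by
    apply List.filter_congr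
    intro y _
    by_cases hxy : y = x <;> simp [hxy, bne]
  rw [hf]
  rfl

theorem any_filter_ne (d : List (String × Int)) (k x : String) :
    (d.filter (fun p => p.1 != k)).any (fun p => p.1 == x)
      = ((d.any (fun p => p.1 == x)) && (x != k)) := by
  rw [Bool.eq_iff_iff]
  simp only [List.any_eq_true, List.mem_filter, bne_iff_ne, beq_iff_eq, Bool.and_eq_true]
  constructor <;> aesop

-- A's fold characterised: the surviving entries are a filter, the count is the number of
-- distinct claves present in the starting dict.
theorem foldA_spec (claves : List String) : ∀ (d : List (String × Int)) (n : Int),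
    claves.foldl
      (fun st key =>
        if st.1.any (fun p => p.1 == key) then
          (st.1.filter (fun p => p.1 != key), st.2 + 1)
        else st)
      (d, n)
    = (d.filter (fun p => !claves.any (fun k => p.1 == k)),
       n + ((PySem.List.dedup (claves.filter (fun k => d.any (fun p => p.1 == k)))).length : Int)) := by
  induction claves with
  | nil => intro d n; simp [PySem.List.dedup, PySem.Set.ofList]
  | cons k ks ih =>
    intro d n
    rw [List.foldl_cons]
    by_cases hk : d.any (fun p => p.1 == k)
    · rw [if_pos hk, ih, List.filter_filter]
      have hfst : ∀ p : String × Int,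
          ((!ks.any fun k' => p.1 == k') && (p.1 != k)) = (!(k :: ks).any fun k' => p.1 == k') := by
        intro p; simp [bne, Bool.and_comm]
      have hcnt : List.filter (fun k' => (List.filter (fun p => p.1 != k) d).any (fun p => p.1 == k')) ks
          = List.filter (fun k' => (k' != k) && (d.any (fun p => p.1 == k'))) ks := by
        apply List.filter_congr; intro k' _; rw [any_filter_ne, Bool.and_comm]
      rw [hcnt]
      have hded : PySem.List.dedup (List.filter (fun k' => d.any (fun p => p.1 == k')) (k :: ks))
          = k :: PySem.List.dedup (List.filter (fun k' => (k' != k) && (d.any (fun p => p.1 == k'))) ks) := by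
        rw [List.filter_cons, if_pos hk, dedup_cons, List.filter_filter]
      rw [hded]
      refine Prod.ext ?_ ?_
      · simp only
        exact List.filter_congr (fun p _ => hfst p)
      · simp only [List.length_cons]
        push_cast
        ring
    · rw [if_neg hk, ih]
      have hkeys : List.filter (fun k' => d.any (fun p => p.1 == k')) (k :: ks)
          = List.filter (fun k' => d.any (fun p => p.1 == k')) ks := by
        rw [List.filter_cons, if_neg (by simpa using hk)]
      rw [hkeys]
      refine Prod.ext ?_ rfl
      simp only
      apply List.filter_congr
      intro p hp
      have hpk : (p.1 == k) = false := by
        rcases Bool.eq_false_iff.mp (eq_false_of_ne_true hk) with _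
        by_contra hc
        exact hk (List.any_eq_true.mpr ⟨p, hp, by simpa using hc⟩)
      simp [hpk]

-- Under distinct keys, the number of distinct claves present equals the number of removed entries.
theorem count_removed (dict_ : List (String × Int)) (claves : List String)
    (hnd : (dict_.map Prod.fst).Nodup) :
    (PySem.List.dedup (claves.filter (fun k => dict_.any (fun p => p.1 == k)))).length
      = (dict_.filter (fun p => claves.any (fun k => p.1 == k))).length := by
  have h2 : ((dict_.filter (fun p => claves.any (fun k => p.1 == k))).map Prod.fst).Nodup :=
    ((List.filter_sublist (l := dict_) (p := fun p => claves.any (fun k => p.1 == k))).map Prod.fst).nodup hnd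
  have h1 : (PySem.List.dedup (claves.filter (fun k => dict_.any (fun p => p.1 == k)))).Nodup :=
    PySem.List.nodup_dedup _
  have hmem : ∀ a, a ∈ PySem.List.dedup (claves.filter (fun k => dict_.any (fun p => p.1 == k)))
      ↔ a ∈ (dict_.filter (fun p => claves.any (fun k => p.1 == k))).map Prod.fst := by
    intro a
    simp only [PySem.List.mem_dedup, List.mem_filter, List.mem_map, List.any_eq_true, beq_iff_eq]
    constructor
    · rintro ⟨ha, p, hp, hpa⟩
      exact ⟨p, ⟨hp, ⟨a, by simp [hpa, ha]⟩⟩, hpa⟩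
    · rintro ⟨p, ⟨hp, k, hk, hpk⟩, hpa⟩
      subst hpa
      exact ⟨hpk ▸ hk, p, hp, rfl⟩
  have hperm := (List.perm_ext_iff_of_nodup h1 h2).mpr hmem
  simpa using hperm.length_eq

-- ===== VERDICT (by name: the statement is the Claim_ definition above) =====
theorem eliminarclaves_spec : Claim_equal_eliminarclaves := by
  intro dict_ claves _ hnd
  show eliminarclaves dict_ claves = eliminarclaves_alt dict_ claves
  unfold eliminarclaves eliminarclaves_alt
  rw [foldA_spec]
  have hflt : dict_.filter (fun p => !PySem.Set.contains (PySem.Set.ofList claves) p.1)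
      = dict_.filter (fun p => !claves.any (fun k => p.1 == k)) := by
    apply List.filter_congr
    intro p _
    have : PySem.Set.contains (PySem.Set.ofList claves) p.1 = claves.any (fun k => p.1 == k) := by
      rw [Bool.eq_iff_iff]
      simp only [PySem.Set.contains, List.contains_iff_exists_mem_beq, List.any_eq_true,
        PySem.Set.mem_ofList]
    rw [this]
  refine Prod.ext (by exact hflt.symm) ?_
  simp only [zero_add, hflt]
  have hsplit := List.length_eq_length_filter_add (l := dict_)
      (fun p => claves.any (fun k => p.1 == k))
  rw [count_removed dict_ claves hnd]
  omega
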